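-- pv_equiv track=rewrite | github.com/MariaZueva/PythonAlgoritm | task_4.1.py | decision_two
-- ===== SOURCE A (Python) =====
-- def decision_two(matrix):
--     max_ = None
--     for j in range(len(matrix[0])):
--         min_ = matrix[0][j]
--         for i in range(len(matrix)):
--             if matrix[i][j] < min_:
--                 min_ = matrix[i][j]
--         if max_ is None or max_ < min_:
--             max_ = min_
--     return max_
-- ===== SOURCE B (Python) =====
-- def decision_two(matrix):
--     # Row-wise sweep: keep a vector of running column minima, updated one row
--     # at a time, then reduce that vector to its maximum.
--     mins = list(matrix[0])
--     for row in matrix[1:]: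
--         mins = [m if m < x else x for m, x in zip(mins, row)]
--     best = None
--     for m in mins:
--         if best is None or best < m:
--             best = m
--     return best
-- ===== Notes on version B (the rewrite author's own statement) =====
-- stated objective: alternative
-- what changed: A scans column by column with nested index loops (inner pass over all rows per column); B makes one row-major sweep maintaining a vector of running column minima (elementwise min of accumulator and each row), then reduces that vector to its max.
-- outside the precondition, e.g. on decision_two([[]]): A returns None, B returns None; on decision_two([[1, 2], [3]]): A raises IndexError, B returns 1
import Mathlib
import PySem

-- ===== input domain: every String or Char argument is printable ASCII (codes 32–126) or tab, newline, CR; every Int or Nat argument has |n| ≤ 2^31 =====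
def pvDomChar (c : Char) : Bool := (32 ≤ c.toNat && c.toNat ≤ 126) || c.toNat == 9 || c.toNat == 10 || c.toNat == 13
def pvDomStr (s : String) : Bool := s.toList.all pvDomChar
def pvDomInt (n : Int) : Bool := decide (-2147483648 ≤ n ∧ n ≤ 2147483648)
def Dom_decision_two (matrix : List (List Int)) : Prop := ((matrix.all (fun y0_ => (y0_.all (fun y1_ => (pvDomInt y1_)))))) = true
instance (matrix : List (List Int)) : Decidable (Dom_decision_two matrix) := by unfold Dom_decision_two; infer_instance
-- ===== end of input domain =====

-- B replaces A's column-by-column nested index loops by a single row-major sweep that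
-- maintains a vector of running column minima, then reduces that vector to its max.

-- ===== PORT A =====
-- literal transliteration of A: outer loop over j in range(len(matrix[0])), inner loop
-- over i in range(len(matrix)), Option accumulator for `max_ = None`. The getD defaults
-- are only reachable where Python raises (excluded by Pre_); the final .getD 0 is the
-- `max_ is None` case, where A returns None, not an int (also excluded by Pre_).
def decision_two (matrix : List (List Int)) : Int :=
  let row0 := matrix.headI
  let res := (PySem.List.pyRange 0 (row0.length : Int) 1).foldl (fun max_ j =>
    let min0 := PySem.List.pyGetD row0 j 0
    let min_ := (PySem.List.pyRange 0 (matrix.length : Int) 1).foldl (fun m i =>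
      let v := PySem.List.pyGetD (PySem.List.pyGetD matrix i []) j 0
      if v < m then v else m) min0
    match max_ with
    | none => some min_
    | some mx => if mx < min_ then some min_ else some mx) none
  res.getD 0

-- ===== PORT B =====
-- port of Source B: `mins = list(matrix[0])`, then for each later row
-- `mins = [m if m < x else x for m, x in zip(mins, row)]` (zip truncates), then the
-- manual `best = None; for m in mins: …` max loop. matrix[0] → headI (empty matrix
-- raises in Python, excluded by Pre_); the final .getD 0 is B's `return None` when
-- mins is empty (outside Pre_).
def decision_two_alt (matrix : List (List Int)) : Int :=
  let mins := matrix.tail.foldl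
    (fun acc row => List.zipWith (fun m x => if m < x then m else x) acc row) matrix.headI
  let best := mins.foldl (fun (b : Option Int) m =>
    match b with
    | none => some m
    | some bv => if bv < m then some m else some bv) none
  best.getD 0

-- ===== PRECONDITION & SPEC =====
-- Pre_ excludes exactly: the empty matrix and matrices with a row shorter than row 0
-- (A raises IndexError), and matrices whose first row is empty (A returns None, not an int).
def Pre_decision_two (matrix : List (List Int)) : Prop :=
  matrix ≠ [] ∧ matrix.headI ≠ [] ∧ ∀ row ∈ matrix, matrix.headI.length ≤ row.length
instance (matrix : List (List Int)) : Decidable (Pre_decision_two matrix) := by unfold Pre_decision_two; infer_instance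
def pvWitness_decision_two : List (List Int) := [[1, 2], [3, 4]]

def Spec_decision_two (matrix : List (List Int)) (out : Int) : Prop := out = decision_two_alt matrix
instance (matrix : List (List Int)) (out : Int) : Decidable (Spec_decision_two matrix out) := by unfold Spec_decision_two; infer_instance

-- ===== CLAIM (what is proved, stated in full; the proofs are below) =====
def Claim_equal_decision_two : Prop := ∀ (matrix : List (List Int)), Dom_decision_two matrix → Pre_decision_two matrix → Spec_decision_two matrix (decision_two matrix)

-- ===== LEMMAS AND PROOFS =====

-- the `is None or <` accumulator, run from `some a`, is the running max
theorem pv_optmax_foldl {a2 : Type} (t : List a2) (f : a2 → Int) (a : Int) :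
    t.foldl (fun (o : Option Int) x =>
      match o with
      | none => some (f x)
      | some mx => if mx < f x then some (f x) else some mx) (some a)
    = some (t.foldl (fun mx x => max mx (f x)) a) := by
  induction t generalizing a with
  | nil => rfl
  | cons x t ih =>
    have h1 : ((fun (o : Option Int) x =>
        match o with
        | none => some (f x)
        | some mx => if mx < f x then some (f x) else some mx) (some a) x) = some (max a (f x)) := by
      simp only
      split_ifs with h
      · rw [max_eq_right (le_of_lt h)]
      · rw [max_eq_left (not_lt.mp h)]
    simp only [List.foldl_cons, h1, ih]

-- run from None over a nonempty list, it is max(map(f, l)) (Python max)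
theorem pv_optmax_map {a2 : Type} (l : List a2) (f : a2 → Int) (h : l ≠ []) :
    (l.foldl (fun (o : Option Int) x =>
      match o with
      | none => some (f x)
      | some mx => if mx < f x then some (f x) else some mx) none).getD 0
    = (PySem.List.max? (l.map f) (fun x => x)).getD 0 := by
  obtain ⟨c, t, rfl⟩ := List.exists_cons_of_ne_nil h
  rw [List.map_cons, PySem.List.max?_id_cons, List.foldl_cons, List.foldl_map]
  show (t.foldl _ (some (f c))).getD 0 = _
  rw [pv_optmax_foldl]

-- A's `if v < m: m = v` accumulator is the running min
theorem pv_foldl_if_min (t : List Int) (a : Int) :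
    t.foldl (fun m v => if v < m then v else m) a = t.foldl min a := by
  induction t generalizing a with
  | nil => rfl
  | cons x t ih =>
    simp only [List.foldl_cons, ih]
    congr 1
    rw [min_def]
    split_ifs <;> omega

-- B's vector of running column minima, written column by column
theorem pv_mins_spec (rs : List (List Int)) (acc : List Int)
    (h : ∀ r ∈ rs, acc.length ≤ r.length) :
    rs.foldl (fun a r => List.zipWith (fun m x => if m < x then m else x) a r) acc
    = (List.range acc.length).map
        (fun j => rs.foldl (fun m r => min m (r.getD j 0)) (acc.getD j 0)) := by
  induction rs generalizing acc with
  | nil =>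
    apply List.ext_getElem
    · simp
    · intro i h1 h2
      have hi : i < acc.length := by simpa using h1
      simp [List.getElem?_eq_getElem hi]
  | cons r rs ih =>
    have hlen : (List.zipWith (fun m x => if m < x then m else x) acc r).length = acc.length := by
      rw [List.length_zipWith]
      exact min_eq_left (h r (by simp))
    rw [List.foldl_cons, ih _ (by intro r' hr'; rw [hlen]; exact h r' (List.mem_cons_of_mem _ hr'))]
    rw [hlen]
    apply List.map_congr_left
    intro j hj
    rw [List.mem_range] at hj
    have hjr : j < r.length := lt_of_lt_of_le hj (h r (by simp))
    have hget : (List.zipWith (fun m x => if m < x then m else x) acc r).getD j 0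
        = min (acc.getD j 0) (r.getD j 0) := by
      rw [List.getD_eq_getElem _ _ (by rw [hlen]; exact hj),
          List.getD_eq_getElem _ _ hj, List.getD_eq_getElem _ _ hjr,
          List.getElem_zipWith]
      rw [min_def]; split_ifs <;> omega
    rw [hget, List.foldl_cons]

theorem decision_two_spec : Claim_equal_decision_two := by
  intro matrix _ hpre
  obtain ⟨hne, hr0, hlen⟩ := hpre
  obtain ⟨r0, rs, rfl⟩ : ∃ r0 rs, matrix = r0 :: rs := by
    cases matrix with
    | nil => exact absurd rfl hne
    | cons a l => exact ⟨a, l, rfl⟩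
  simp only [List.headI] at hr0 hlen
  show decision_two (r0 :: rs) = decision_two_alt (r0 :: rs)
  -- B side: mins is the column-minima vector, best its Python max
  have hB : decision_two_alt (r0 :: rs)
      = (PySem.List.max? (((List.range r0.length).map
          (fun j => (PySem.List.min? ((r0 :: rs).map (fun r => r.getD j 0)) (fun x => x)).getD 0)))
          (fun x => x)).getD 0 := by
    simp only [decision_two_alt, List.tail_cons, List.headI]
    rw [pv_mins_spec rs r0 (fun r hr => hlen r (List.mem_cons_of_mem _ hr))]
    have hcols : ∀ j ∈ List.range r0.length,
        rs.foldl (fun m r => min m (r.getD j 0)) (r0.getD j 0)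
        = (PySem.List.min? ((r0 :: rs).map (fun r => r.getD j 0)) (fun x => x)).getD 0 := by
      intro j _
      rw [List.map_cons, PySem.List.min?_id_cons, List.foldl_map]
      simp
    rw [List.map_congr_left hcols]
    have hne' : ((List.range r0.length).map
        (fun j => (PySem.List.min? ((r0 :: rs).map (fun r => r.getD j 0)) (fun x => x)).getD 0)) ≠ [] := by
      simp only [ne_eq, List.map_eq_nil_iff, List.range_eq_nil]
      exact fun h => hr0 (List.length_eq_zero_iff.mp h)
    have := pv_optmax_map _ (fun x : Int => x) hne'
    simp only [List.map_id'] at this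
    exact this
  rw [hB]
  -- A side (as in the nested-loop reading): per column j, the inner loop is min(column j)
  simp only [decision_two, List.headI]
  rw [PySem.List.pyRange_one 0 ((r0.length : Int))]
  simp only [sub_zero, Int.toNat_natCast, zero_add, List.foldl_map]
  have hcol : ∀ (acc : Option Int), ∀ j ∈ List.range r0.length,
      (match acc with
        | none => some ((PySem.List.pyRange 0 ((r0 :: rs).length : Int) 1).foldl (fun m i =>
            if PySem.List.pyGetD (PySem.List.pyGetD (r0 :: rs) i []) (j : Int) 0 < m
            then PySem.List.pyGetD (PySem.List.pyGetD (r0 :: rs) i []) (j : Int) 0 else m)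
            (PySem.List.pyGetD r0 (j : Int) 0))
        | some mx =>
          if mx < (PySem.List.pyRange 0 ((r0 :: rs).length : Int) 1).foldl (fun m i =>
            if PySem.List.pyGetD (PySem.List.pyGetD (r0 :: rs) i []) (j : Int) 0 < m
            then PySem.List.pyGetD (PySem.List.pyGetD (r0 :: rs) i []) (j : Int) 0 else m)
            (PySem.List.pyGetD r0 (j : Int) 0)
          then some ((PySem.List.pyRange 0 ((r0 :: rs).length : Int) 1).foldl (fun m i =>
            if PySem.List.pyGetD (PySem.List.pyGetD (r0 :: rs) i []) (j : Int) 0 < m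
            then PySem.List.pyGetD (PySem.List.pyGetD (r0 :: rs) i []) (j : Int) 0 else m)
            (PySem.List.pyGetD r0 (j : Int) 0))
          else some mx)
      = (match acc with
        | none => some ((PySem.List.min? ((r0 :: rs).map (fun r => r.getD j 0)) (fun x => x)).getD 0)
        | some mx =>
          if mx < (PySem.List.min? ((r0 :: rs).map (fun r => r.getD j 0)) (fun x => x)).getD 0
          then some ((PySem.List.min? ((r0 :: rs).map (fun r => r.getD j 0)) (fun x => x)).getD 0)
          else some mx) := by
    intro acc j hj
    rw [List.mem_range] at hj
    have hget : ∀ r ∈ (r0 :: rs), PySem.List.pyGetD r (j : Int) 0 = r.getD j 0 := by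
      intro r hr
      exact PySem.List.pyGetD_natCast r j 0
    have hmin :
        (PySem.List.pyRange 0 ((r0 :: rs).length : Int) 1).foldl (fun m i =>
            if PySem.List.pyGetD (PySem.List.pyGetD (r0 :: rs) i []) (j : Int) 0 < m
            then PySem.List.pyGetD (PySem.List.pyGetD (r0 :: rs) i []) (j : Int) 0 else m)
            (PySem.List.pyGetD r0 (j : Int) 0)
        = (PySem.List.min? ((r0 :: rs).map (fun r => r.getD j 0)) (fun x => x)).getD 0 := by
      rw [PySem.List.foldl_pyRange_zero_pyGetD' (r0 :: rs) ([] : List Int)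
          (fun m r => if PySem.List.pyGetD r (j : Int) 0 < m
                      then PySem.List.pyGetD r (j : Int) 0 else m)
          (PySem.List.pyGetD r0 (j : Int) 0)]
      rw [← List.foldl_map (f := fun r : List Int => PySem.List.pyGetD r ((j : Nat) : Int) 0)
            (g := fun m v => if v < m then v else m)]
      rw [List.map_congr_left hget]
      rw [hget r0 (by simp)]
      rw [pv_foldl_if_min]
      rw [List.map_cons, PySem.List.min?_id_cons]
      simp [min_self]
    rw [hmin]
  rw [PySem.List.foldl_congr_mem _ _ _ _ hcol]
  rw [pv_optmax_map (List.range r0.length) _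
    (by simp only [ne_eq, List.range_eq_nil]; exact fun h => hr0 (List.length_eq_zero_iff.mp h))]

-- ===== VERDICT (by name: the statement is the Claim_ definition above) =====
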